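-- pv_equiv track=rewrite | github.com/aevelhoch/PyImageTagger | boolExpConvert.py | validateExpressionExp
-- ===== SOURCE A (Python) =====
-- def validateExpressionExp(expTokens):
--     currParens = 0
--     typeTokens = []
--     typeTokensSub = []
--     inSub = False
--     for token in expTokens:
--         if not inSub:
--             if token != "(" and token != ")":
--                 if token in ["v","^","x"]:
--                     typeTokens.append("op")
--                 else:
--                     typeTokens.append("tag")
--             if token == "(":
--                 inSub = True
--                 typeTokens.append("tag")
--         elif inSub:
--             if token in ["v","^","x"]:
--                 typeTokensSub.append("op")
--             elif token != ")":
--                 typeTokensSub.append("tag")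
--             elif token == ")":
--                 inSub = False
--                 for index, type in enumerate(typeTokensSub):
--                     if type == "tag":
--                         if index % 2 == 1:
--                             return False
--                     if type == "op":
--                         if index % 2 == 0:
--                             return False
--                 typeTokensSub = []
--     for index, type in enumerate(typeTokens):
--         if type == "tag":
--             if index % 2 == 1:
--                 return False
--         if type == "op":
--             if index % 2 == 0:
--                 return False
--     return True
-- ===== SOURCE B (Python) =====
-- def validateExpressionExp(expTokens):
--     # Single pass with two position counters instead of building type-lists
--     # and scanning them afterwards.  A sub-expression failure is only reported
--     # when its ")" arrives (an unterminated sub is never judged, like A).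
--     mainIdx = 0
--     inSub = False
--     subIdx = 0
--     subBad = False
--     for t in expTokens:
--         if inSub:
--             if t == ")":
--                 if subBad:
--                     return False
--                 inSub = False
--                 subIdx = 0
--                 subBad = False
--             else:
--                 isOp = t in ("v", "^", "x")
--                 if isOp != (subIdx % 2 == 1):
--                     subBad = True
--                 subIdx += 1
--         else:
--             if t == ")":
--                 continue
--             if t == "(":
--                 if mainIdx % 2 == 1:
--                     return False
--                 inSub = True
--             else:
--                 isOp = t in ("v", "^", "x")
--                 if isOp != (mainIdx % 2 == 1):
--                     return False
--             mainIdx += 1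
--     return True
-- ===== Notes on version B (the rewrite author's own statement) =====
-- stated objective: simpler
-- what changed: B replaces A's two accumulated type-lists and their trailing enumerate parity scans with a single pass that keeps two position counters (mainIdx, subIdx) and a sub-failure flag, rejecting main-level parity violations immediately and sub violations at the closing ')'. (constant-factor speedup: no list building or second scan)
import Mathlib
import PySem

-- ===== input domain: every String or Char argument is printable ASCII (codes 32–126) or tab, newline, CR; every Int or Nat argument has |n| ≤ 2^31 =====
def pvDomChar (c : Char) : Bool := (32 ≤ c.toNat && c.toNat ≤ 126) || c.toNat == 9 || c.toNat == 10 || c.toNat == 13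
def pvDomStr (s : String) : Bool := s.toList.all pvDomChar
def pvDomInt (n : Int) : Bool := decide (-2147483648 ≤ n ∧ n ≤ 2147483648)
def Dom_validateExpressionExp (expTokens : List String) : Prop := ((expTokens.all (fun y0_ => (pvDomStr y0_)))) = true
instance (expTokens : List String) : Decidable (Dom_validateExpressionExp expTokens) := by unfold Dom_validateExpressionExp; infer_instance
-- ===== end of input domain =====

-- B replaces A's accumulated type-lists + trailing parity scans with a single
-- pass keeping two position counters and a sub-failure flag (simpler, O(1) space).


-- ===== PORT A =====
-- the trailing `for index, type in enumerate(...)` parity scan of A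
def pvCheckTypes : Nat → List String → Bool
  | _, [] => true
  | index, ty :: rest =>
    if ty = "tag" ∧ index % 2 = 1 then false
    else if ty = "op" ∧ index % 2 = 0 then false
    else pvCheckTypes (index + 1) rest

-- A's main loop over the tokens, carrying typeTokens / typeTokensSub / inSub
def pvGoA : List String → List String → List String → Bool → Bool
  | [], typeTokens, _, _ => pvCheckTypes 0 typeTokens
  | token :: rest, typeTokens, typeTokensSub, inSub =>
    if inSub = false then
      let tt1 :=
        if token ≠ "(" ∧ token ≠ ")" then
          typeTokens ++ [if token = "v" ∨ token = "^" ∨ token = "x" then "op" else "tag"]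
        else typeTokens
      if token = "(" then pvGoA rest (tt1 ++ ["tag"]) typeTokensSub true
      else pvGoA rest tt1 typeTokensSub inSub
    else
      if token = "v" ∨ token = "^" ∨ token = "x" then
        pvGoA rest typeTokens (typeTokensSub ++ ["op"]) inSub
      else if token ≠ ")" then
        pvGoA rest typeTokens (typeTokensSub ++ ["tag"]) inSub
      else
        if pvCheckTypes 0 typeTokensSub then pvGoA rest typeTokens [] false else false

def validateExpressionExp (expTokens : List String) : Bool :=
  pvGoA expTokens [] [] false

-- ===== PORT B =====
-- B's single pass: mainIdx, inSub, subIdx, subBad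
def pvGoB : List String → Nat → Bool → Nat → Bool → Bool
  | [], _, _, _, _ => true
  | t :: rest, mainIdx, inSub, subIdx, subBad =>
    if inSub then
      if t = ")" then
        if subBad then false else pvGoB rest mainIdx false 0 false
      else
        let isOp := decide (t = "v" ∨ t = "^" ∨ t = "x")
        pvGoB rest mainIdx true (subIdx + 1) (subBad || (isOp != decide (subIdx % 2 = 1)))
    else
      if t = ")" then pvGoB rest mainIdx false subIdx subBad
      else if t = "(" then
        if mainIdx % 2 = 1 then false else pvGoB rest (mainIdx + 1) true subIdx subBad
      else
        let isOp := decide (t = "v" ∨ t = "^" ∨ t = "x")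
        if isOp != decide (mainIdx % 2 = 1) then false
        else pvGoB rest (mainIdx + 1) false subIdx subBad

def validateExpressionExp_alt (expTokens : List String) : Bool :=
  pvGoB expTokens 0 false 0 false

-- ===== PRECONDITION & SPEC =====
def Spec_validateExpressionExp (expTokens : List String) (out : Bool) : Prop := out = validateExpressionExp_alt expTokens
instance (expTokens : List String) (out : Bool) : Decidable (Spec_validateExpressionExp expTokens out) := by unfold Spec_validateExpressionExp; infer_instance

-- ===== CLAIM (what is proved, stated in full; the proofs are below) =====
def Claim_equal_validateExpressionExp : Prop := ∀ (expTokens : List String), Dom_validateExpressionExp expTokens → Spec_validateExpressionExp expTokens (validateExpressionExp expTokens)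

-- ===== LEMMAS AND PROOFS =====

theorem pvCheckTypes_append (i : Nat) (l : List String) (x : String) :
    pvCheckTypes i (l ++ [x]) = (pvCheckTypes i l && pvCheckTypes (i + l.length) [x]) := by
  induction l generalizing i with
  | nil => simp [pvCheckTypes]
  | cons h t ih =>
    simp only [List.cons_append, pvCheckTypes, List.length_cons]
    have e : i + 1 + t.length = i + (t.length + 1) := by omega
    split_ifs <;> simp_all [pvCheckTypes, e] <;> tauto

theorem pvGoA_false (tokens : List String) :
    ∀ tt tts inSub, pvCheckTypes 0 tt = false → pvGoA tokens tt tts inSub = false := by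
  induction tokens with
  | nil => intro tt tts inSub h; simpa [pvGoA] using h
  | cons token rest ih =>
    intro tt tts inSub h
    have happ : ∀ x, pvCheckTypes 0 (tt ++ [x]) = false := by
      intro x; rw [pvCheckTypes_append, h]; simp
    simp only [pvGoA]
    split_ifs <;> simp_all [ih, happ]

theorem pvGoA_eq_pvGoB (tokens : List String) :
    ∀ tt tts inSub, pvCheckTypes 0 tt = true → (inSub = false → tts = []) →
      pvGoA tokens tt tts inSub =
        pvGoB tokens tt.length inSub tts.length (!(pvCheckTypes 0 tts)) := by
  induction tokens with
  | nil =>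
    intro tt tts inSub h _
    simp [pvGoA, pvGoB, h]
  | cons token rest ih =>
    intro tt tts inSub h hsub
    by_cases hin : inSub = false
    · subst hin
      have htts : tts = [] := hsub rfl
      subst htts
      by_cases hclose : token = ")"
      · subst hclose
        simp only [pvGoA, pvGoB]
        simpa [pvCheckTypes] using ih tt [] false h (fun _ => rfl)
      · by_cases hopen : token = "("
        · subst hopen
          have happ : pvCheckTypes 0 (tt ++ ["tag"]) =
              (pvCheckTypes 0 tt && pvCheckTypes tt.length ["tag"]) := by
            simpa using pvCheckTypes_append 0 tt "tag"
          by_cases hpar : tt.length % 2 = 1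
          · have hbad : pvCheckTypes 0 (tt ++ ["tag"]) = false := by
              rw [happ, h]; simp [pvCheckTypes, hpar]
            simp [pvGoA, pvGoB, hpar, pvGoA_false rest _ _ _ hbad]
          · have hgood : pvCheckTypes 0 (tt ++ ["tag"]) = true := by
              rw [happ, h]; simp [pvCheckTypes, hpar]
            have := ih (tt ++ ["tag"]) [] true hgood (by simp)
            simp only [pvGoA, pvGoB]
            simpa [pvCheckTypes, hpar] using this
        · -- ordinary main-level token
          by_cases hop : token = "v" ∨ token = "^" ∨ token = "x"
          · have happ : pvCheckTypes 0 (tt ++ ["op"]) =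
                (pvCheckTypes 0 tt && pvCheckTypes tt.length ["op"]) := by
              simpa using pvCheckTypes_append 0 tt "op"
            by_cases hpar : tt.length % 2 = 1
            · have hgood : pvCheckTypes 0 (tt ++ ["op"]) = true := by
                rw [happ, h]; simp [pvCheckTypes]; omega
              have := ih (tt ++ ["op"]) [] false hgood (fun _ => rfl)
              simp only [pvGoA, pvGoB]
              simpa [pvCheckTypes, hop, hopen, hclose, hpar] using this
            · have hbad : pvCheckTypes 0 (tt ++ ["op"]) = false := by
                rw [happ, h]; simp [pvCheckTypes]; omega
              simp [pvGoA, pvGoB, hop, hopen, hclose, hpar,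
                pvGoA_false rest _ _ _ hbad]
          · have happ : pvCheckTypes 0 (tt ++ ["tag"]) =
                (pvCheckTypes 0 tt && pvCheckTypes tt.length ["tag"]) := by
              simpa using pvCheckTypes_append 0 tt "tag"
            by_cases hpar : tt.length % 2 = 1
            · have hbad : pvCheckTypes 0 (tt ++ ["tag"]) = false := by
                rw [happ, h]; simp [pvCheckTypes, hpar]
              simp [pvGoA, pvGoB, hop, hopen, hclose, hpar,
                pvGoA_false rest _ _ _ hbad]
            · have hgood : pvCheckTypes 0 (tt ++ ["tag"]) = true := by
                rw [happ, h]; simp [pvCheckTypes, hpar]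
              have := ih (tt ++ ["tag"]) [] false hgood (fun _ => rfl)
              simp only [pvGoA, pvGoB]
              simpa [pvCheckTypes, hop, hopen, hclose, hpar] using this
    · have hin' : inSub = true := by cases inSub <;> simp_all
      subst hin'
      by_cases hop : token = "v" ∨ token = "^" ∨ token = "x"
      · have happ : pvCheckTypes 0 (tts ++ ["op"]) =
            (pvCheckTypes 0 tts && pvCheckTypes tts.length ["op"]) := by
          simpa using pvCheckTypes_append 0 tts "op"
        have hval : pvCheckTypes tts.length ["op"] = decide (tts.length % 2 = 1) := by
          rcases Nat.mod_two_eq_zero_or_one tts.length with hm | hm <;> simp [pvCheckTypes, hm]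
        have := ih tt (tts ++ ["op"]) true h (by simp)
        have hclose : token ≠ ")" := by rcases hop with h1 | h1 | h1 <;> simp [h1]
        simp only [pvGoA, pvGoB, if_pos hop, this, happ, List.length_append,
          List.length_cons, List.length_nil]
        simp only [show ¬(true = false) by simp, if_neg, hclose, hval]
        simp
        congr 1
        cases hc : pvCheckTypes 0 tts <;>
          rcases Nat.mod_two_eq_zero_or_one tts.length with hm | hm <;> simp [hm, hop] <;> tauto
      · by_cases hclose : token = ")"
        · subst hclose
          by_cases hsubok : pvCheckTypes 0 tts = true
          · have := ih tt [] false h (fun _ => rfl)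
            simp only [pvGoA, pvGoB]
            simpa [hop, hsubok, pvCheckTypes] using this
          · have hsubbad : pvCheckTypes 0 tts = false := by
              cases hcv : pvCheckTypes 0 tts <;> simp_all
            simp [pvGoA, pvGoB, hop, hsubbad]
        · -- sub-level tag (including a nested "(")
          have happ : pvCheckTypes 0 (tts ++ ["tag"]) =
              (pvCheckTypes 0 tts && pvCheckTypes tts.length ["tag"]) := by
            simpa using pvCheckTypes_append 0 tts "tag"
          have hval : pvCheckTypes tts.length ["tag"] = !decide (tts.length % 2 = 1) := by
            simp [pvCheckTypes]
          have := ih tt (tts ++ ["tag"]) true h (by simp)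
          simp only [pvGoA, pvGoB, if_neg hop,
            if_pos (by simp [hclose] : token ≠ ")"), this, happ,
            List.length_append, List.length_cons, List.length_nil]
          simp only [show ¬(true = false) by simp, if_neg, hclose, hop, hval]
          simp [hclose]

-- ===== VERDICT (by name: the statement is the Claim_ definition above) =====
theorem validateExpressionExp_spec : Claim_equal_validateExpressionExp := by
  intro expTokens _
  unfold Spec_validateExpressionExp validateExpressionExp validateExpressionExp_alt
  simpa [pvCheckTypes] using
    pvGoA_eq_pvGoB expTokens [] [] false (by simp [pvCheckTypes]) (fun _ => rfl)
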